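-- pv_equiv track=rewrite | github.com/deivard/advent-of-code-2022 | day_16/day_16.py | find_mutualy_exclusive_paths
-- ===== SOURCE A (Python) =====
-- def find_mutualy_exclusive_paths(path_history):
--     mutually_exclusives = []
--     for i, (path_a, pressure_a) in enumerate(path_history):
--         set_a = set(path_a)
--         for path_b, pressure_b in path_history[i+1:]:
--             set_b = set(path_b)
--             if len(set_a.intersection(set_b)) == 0:
--                 mutually_exclusives.append([
--                     (path_a, pressure_a),
--                     (path_b, pressure_b)
--                 ])
--     return mutually_exclusives
-- ===== SOURCE B (Python) =====
-- def find_mutualy_exclusive_paths(path_history):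
--     # Different algorithm: build an inverted index (valve -> set of indices of
--     # paths containing that valve) in one pass; the paths conflicting with path i
--     # are the union of the postings of its valves, so each later path is emitted
--     # by a single index-membership test instead of a per-pair set intersection.
--     postings = {}
--     for i, (path, _pressure) in enumerate(path_history):
--         for valve in path:
--             postings.setdefault(valve, set()).add(i)
--     result = []
--     for i, (path_a, pressure_a) in enumerate(path_history):
--         conflicts = set()
--         for valve in path_a:
--             conflicts |= postings[valve]
--         for j, (path_b, pressure_b) in enumerate(path_history[i + 1:], i + 1):
--             if j not in conflicts:
--                 result.append([(path_a, pressure_a), (path_b, pressure_b)])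
--     return result
-- ===== Notes on version B (the rewrite author's own statement) =====
-- stated objective: faster
-- what changed: B replaces A's per-pair set intersections by an inverted index from valve to the set of path indices containing it: for each path the conflicting indices are the union of its valves' postings, so each candidate pair is decided by one index-membership test instead of building and intersecting two sets.
import Mathlib
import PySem

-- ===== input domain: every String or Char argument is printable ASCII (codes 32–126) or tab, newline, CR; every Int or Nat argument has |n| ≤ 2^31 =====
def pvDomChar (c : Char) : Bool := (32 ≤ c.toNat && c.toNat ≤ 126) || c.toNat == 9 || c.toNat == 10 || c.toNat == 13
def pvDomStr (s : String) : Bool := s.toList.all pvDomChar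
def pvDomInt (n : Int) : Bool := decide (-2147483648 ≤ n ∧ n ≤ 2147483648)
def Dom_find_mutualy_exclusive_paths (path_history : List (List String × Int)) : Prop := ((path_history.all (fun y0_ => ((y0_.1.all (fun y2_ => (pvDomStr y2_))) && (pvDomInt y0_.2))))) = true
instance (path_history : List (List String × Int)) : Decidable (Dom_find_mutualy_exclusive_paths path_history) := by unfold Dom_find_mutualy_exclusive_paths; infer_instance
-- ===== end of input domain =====

-- B builds an inverted index valve → set of path indices, takes per path the union of its
-- valves' postings as its conflict set, and emits each later index not in that set — no
-- per-pair set intersection.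

-- ===== PORT A =====
def find_mutualy_exclusive_paths (path_history : List (List String × Int)) : List (List (List String × Int)) :=
  (PySem.List.enumerate path_history).foldl
    (fun mutually_exclusives p =>
      let path_a := p.2.1
      let pressure_a := p.2.2
      let set_a : PySem.Set String := PySem.Set.ofList path_a
      (PySem.List.slice path_history (some (p.1 + 1)) none).foldl
        (fun acc q =>
          let set_b : PySem.Set String := PySem.Set.ofList q.1
          if PySem.Set.len (PySem.Set.inter set_a set_b) == 0 then
            acc ++ [[(path_a, pressure_a), (q.1, q.2)]]
          else acc)
        mutually_exclusives)
    []

-- ===== PORT B =====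
-- 'postings.setdefault(valve, set()).add(i)' : overwrite the (possibly fresh) posting set of valve with itself plus i
def pvPostAdd (i : Int) (d : PySem.Dict String (PySem.Set Int)) (v : String) : PySem.Dict String (PySem.Set Int) :=
  d.insert v (PySem.Set.add (d.getD v PySem.Set.empty) i)

-- 'for i, (path, _pressure) in enumerate(path_history): for valve in path: …'
def pvPostings (path_history : List (List String × Int)) : PySem.Dict String (PySem.Set Int) :=
  (PySem.List.enumerate path_history).foldl (fun d p => p.2.1.foldl (pvPostAdd p.1) d) PySem.Dict.empty

-- 'conflicts = set(); for valve in path_a: conflicts |= postings[valve]'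
-- (postings[valve] always exists for valve ∈ path_a, so the total getD is exact here)
def pvConflicts (postings : PySem.Dict String (PySem.Set Int)) (path_a : List String) : PySem.Set Int :=
  path_a.foldl (fun s v => PySem.Set.union s (postings.getD v PySem.Set.empty)) PySem.Set.empty

def find_mutualy_exclusive_paths_alt (path_history : List (List String × Int)) : List (List (List String × Int)) :=
  let postings := pvPostings path_history
  (PySem.List.enumerate path_history).foldl
    (fun result p =>
      let conflicts := pvConflicts postings p.2.1
      (PySem.List.enumerate (PySem.List.slice path_history (some (p.1 + 1)) none) (p.1 + 1)).foldl
        (fun acc q =>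
          if !(PySem.Set.contains conflicts q.1) then
            acc ++ [[(p.2.1, p.2.2), (q.2.1, q.2.2)]]
          else acc)
        result)
    []

-- ===== PRECONDITION & SPEC =====
def Spec_find_mutualy_exclusive_paths (path_history : List (List String × Int)) (out : List (List (List String × Int))) : Prop := out = find_mutualy_exclusive_paths_alt path_history
instance (path_history : List (List String × Int)) (out : List (List (List String × Int))) : Decidable (Spec_find_mutualy_exclusive_paths path_history out) := by unfold Spec_find_mutualy_exclusive_paths; infer_instance

-- ===== CLAIM (what is proved, stated in full; the proofs are below) =====
def Claim_equal_find_mutualy_exclusive_paths : Prop := ∀ (path_history : List (List String × Int)), Dom_find_mutualy_exclusive_paths path_history → Spec_find_mutualy_exclusive_paths path_history (find_mutualy_exclusive_paths path_history)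

-- ===== LEMMAS AND PROOFS =====

-- A's inner test on a pair of paths
def pvCondA (pa pb : List String) : Bool :=
  PySem.Set.len (PySem.Set.inter (PySem.Set.ofList pa) (PySem.Set.ofList pb)) == 0

-- "all ordered pairs of suffix elements passing a test" shape
def pvTailPairs {E O : Type} (cond : E → E → Bool) (mk : E → E → O) : List E → List O
  | [] => []
  | e :: t => (t.filter (cond e)).map (mk e) ++ pvTailPairs cond mk t

theorem pvCondA_iff (pa pb : List String) : pvCondA pa pb = true ↔ ∀ v ∈ pa, v ∉ pb := by
  unfold pvCondA
  rw [beq_iff_eq]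
  unfold PySem.Set.len
  rw [Int.natCast_eq_zero, List.length_eq_zero_iff, List.eq_nil_iff_forall_not_mem]
  constructor
  · intro h v hvx hvy
    exact h v ((PySem.Set.mem_inter _ _ v).mpr
      ⟨(PySem.Set.mem_ofList _ v).mpr hvx, (PySem.Set.mem_ofList _ v).mpr hvy⟩)
  · intro h v hv
    rw [PySem.Set.mem_inter] at hv
    exact h v ((PySem.Set.mem_ofList _ v).mp hv.1) ((PySem.Set.mem_ofList _ v).mp hv.2)

-- characterisation of A: all later-indexed partners with disjoint valve sets, in order
theorem pvA_gen (suf pre : List (List String × Int)) (acc_ : List (List (List String × Int))) :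
    (PySem.List.enumerate suf (pre.length : Int)).foldl
      (fun mutually_exclusives p =>
        let path_a := p.2.1
        let pressure_a := p.2.2
        let set_a : PySem.Set String := PySem.Set.ofList path_a
        (PySem.List.slice (pre ++ suf) (some (p.1 + 1)) none).foldl
          (fun acc q =>
            let set_b : PySem.Set String := PySem.Set.ofList q.1
            if PySem.Set.len (PySem.Set.inter set_a set_b) == 0 then
              acc ++ [[(path_a, pressure_a), (q.1, q.2)]]
            else acc)
          mutually_exclusives) acc_
    = acc_ ++ pvTailPairs (fun x y => pvCondA x.1 y.1) (fun x y => [x, y]) suf := by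
  induction suf generalizing pre acc_ with
  | nil => simp [PySem.List.enumerate, pvTailPairs]
  | cons e t ih =>
      rw [PySem.List.enumerate_cons, List.foldl_cons]
      have hslice : PySem.List.slice (pre ++ e :: t) (some ((pre.length : Int) + 1)) none = t := by
        rw [PySem.List.slice_from _ (by positivity)]
        have h1 : ((pre.length : Int) + 1).toNat = (pre ++ [e]).length := by simp
        have h2 : pre ++ e :: t = (pre ++ [e]) ++ t := by simp
        rw [h1, h2, List.drop_left]
      simp only [hslice]
      rw [PySem.List.foldl_append_if
        (fun q : List String × Int => ((PySem.Set.ofList e.1).inter (PySem.Set.ofList q.1)).len == 0)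
        (fun q : List String × Int => [(e.1, e.2), (q.1, q.2)])]
      have h3 : (pre.length : Int) + 1 = (((pre ++ [e]).length : Nat) : Int) := by simp
      have h4 : pre ++ e :: t = (pre ++ [e]) ++ t := by simp
      rw [h3, h4, ih (pre ++ [e])]
      simp [pvTailPairs, pvCondA]

theorem pvA_char (path_history : List (List String × Int)) :
    find_mutualy_exclusive_paths path_history =
      pvTailPairs (fun x y => pvCondA x.1 y.1) (fun x y => [x, y]) path_history := by
  have := pvA_gen path_history [] []
  simpa [find_mutualy_exclusive_paths] using this

-- ---- B: semantics of the inverted index ----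

-- one path's inner loop over the postings dictionary
theorem pvPostAdd_mem (pa : List String) (i : Int) :
    ∀ (d : PySem.Dict String (PySem.Set Int)) (v : String) (j : Int),
      j ∈ (pa.foldl (pvPostAdd i) d).getD v PySem.Set.empty ↔
        j ∈ d.getD v PySem.Set.empty ∨ (j = i ∧ v ∈ pa) := by
  induction pa with
  | nil => simp
  | cons w rest ih =>
      intro d v j
      rw [List.foldl_cons, ih]
      unfold pvPostAdd
      rw [PySem.Dict.getD_insert]
      by_cases hvw : v = w
      · subst hvw
        simp [PySem.Set.mem_add]
        tauto
      · simp [hvw]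

-- the whole building pass over an arbitrary enumerated list
theorem pvPostings_mem_gen (l : List (Int × (List String × Int))) :
    ∀ (d : PySem.Dict String (PySem.Set Int)) (v : String) (j : Int),
      j ∈ (l.foldl (fun d p => p.2.1.foldl (pvPostAdd p.1) d) d).getD v PySem.Set.empty ↔
        j ∈ d.getD v PySem.Set.empty ∨ ∃ p ∈ l, j = p.1 ∧ v ∈ p.2.1 := by
  induction l with
  | nil => simp
  | cons p rest ih =>
      intro d v j
      rw [List.foldl_cons, ih, pvPostAdd_mem]
      simp
      tauto

-- the conflict set of a path = union over its valves of the postings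
theorem pvConflicts_mem_gen (pa : List String) (postings : PySem.Dict String (PySem.Set Int)) :
    ∀ (s : PySem.Set Int) (j : Int),
      j ∈ pa.foldl (fun s v => PySem.Set.union s (postings.getD v PySem.Set.empty)) s ↔
        j ∈ s ∨ ∃ v ∈ pa, j ∈ postings.getD v PySem.Set.empty := by
  induction pa with
  | nil => simp
  | cons w rest ih =>
      intro s j
      rw [List.foldl_cons, ih]
      rw [PySem.Set.mem_union]
      simp
      tauto

-- j is in the conflict set of pa  ↔  some path of index j shares a valve with pa
theorem pvConflicts_char (ph : List (List String × Int)) (pa : List String) (j : Int) :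
    j ∈ pvConflicts (pvPostings ph) pa ↔
      ∃ k : Nat, ∃ _ : k < ph.length, j = (k : Int) ∧ ∃ v ∈ pa, v ∈ ph[k].1 := by
  unfold pvConflicts pvPostings
  rw [pvConflicts_mem_gen]
  constructor
  · rintro (hj | ⟨v, hv, hj⟩)
    · exact absurd hj (by simp [PySem.Set.empty])
    · rw [pvPostings_mem_gen] at hj
      rcases hj with hj | ⟨p, hp, hji, hvp⟩
      · simp [PySem.Dict.empty, PySem.Dict.get?, PySem.Dict.getD] at hj
      · rw [PySem.List.mem_enumerate_iff] at hp
        obtain ⟨k, hk, hpk⟩ := hp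
        exact ⟨k, hk, by simpa [hpk] using hji, v, hv, by rw [hpk] at hvp; simpa using hvp⟩
  · rintro ⟨k, hk, hj, v, hv, hvk⟩
    refine Or.inr ⟨v, hv, ?_⟩
    rw [pvPostings_mem_gen]
    exact Or.inr ⟨((k : Int), ph[k]), (PySem.List.mem_enumerate_iff _ _ _).mpr ⟨k, hk, by simp⟩, hj, hvk⟩

-- generic: an indexed filter-append loop whose test agrees with a test on the element
theorem pvEnumFoldFilter {α β : Type} (c : Int → Bool) (c' : α → Bool) (f : α → β) :
    ∀ (l : List α) (off : Int) (acc : List β),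
      (∀ (k : Nat) (h : k < l.length), c (off + (k : Int)) = c' l[k]) →
      (PySem.List.enumerate l off).foldl
        (fun acc q => if c q.1 then acc ++ [f q.2] else acc) acc
      = acc ++ (l.filter c').map f := by
  intro l
  induction l with
  | nil => simp [PySem.List.enumerate]
  | cons x rest ih =>
      intro off acc h
      rw [PySem.List.enumerate_cons, List.foldl_cons]
      have h0 : c off = c' x := by simpa using h 0 (by simp)
      have hrec : ∀ (k : Nat) (hh : k < rest.length), c (off + 1 + (k : Int)) = c' rest[k] := by
        intro k hh
        have := h (k + 1) (by simpa using Nat.succ_lt_succ hh)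
        simpa [add_assoc, add_comm, add_left_comm] using this
      rw [List.filter_cons]
      by_cases hc : c' x = true
      · simp only [hc, if_true, h0, ih (off + 1) (acc ++ [f x]) hrec]
        simp
      · have : c' x = false := by simpa using hc
        simp only [this, if_false, h0, Bool.false_eq_true, ih (off + 1) acc hrec]

-- element of ph at index pre.length + 1 + k, when ph = pre ++ e :: t
theorem pvGetAppend (pre t : List (List String × Int)) (e : List String × Int)
    (k : Nat) (hk : k < t.length) :
    ∃ h : pre.length + 1 + k < (pre ++ e :: t).length, (pre ++ e :: t)[pre.length + 1 + k] = t[k] := by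
  refine ⟨by simp; omega, ?_⟩
  rw [List.getElem_append_right (by omega)]
  have : pre.length + 1 + k - pre.length = k + 1 := by omega
  simp [this]

-- B's outer loop produces the same tail-pairs as A
theorem pvB_gen (ph : List (List String × Int)) :
    ∀ (suf pre : List (List String × Int)) (acc_ : List (List (List String × Int))),
      pre ++ suf = ph →
      (PySem.List.enumerate suf (pre.length : Int)).foldl
        (fun result p =>
          (PySem.List.enumerate (PySem.List.slice ph (some (p.1 + 1)) none) (p.1 + 1)).foldl
            (fun acc q =>
              if !(PySem.Set.contains (pvConflicts (pvPostings ph) p.2.1) q.1) then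
                acc ++ [[(p.2.1, p.2.2), (q.2.1, q.2.2)]]
              else acc)
            result)
        acc_
      = acc_ ++ pvTailPairs (fun x y => pvCondA x.1 y.1) (fun x y => [x, y]) suf := by
  intro suf
  induction suf with
  | nil => intro pre acc_ _; simp [PySem.List.enumerate, pvTailPairs]
  | cons e t ih =>
      intro pre acc_ hpre
      subst hpre
      rw [PySem.List.enumerate_cons, List.foldl_cons]
      have hslice : PySem.List.slice (pre ++ e :: t) (some ((pre.length : Int) + 1)) none = t := by
        rw [PySem.List.slice_from _ (by positivity)]
        have h1 : ((pre.length : Int) + 1).toNat = (pre ++ [e]).length := by simp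
        have h2 : pre ++ e :: t = (pre ++ [e]) ++ t := by simp
        rw [h1, h2, List.drop_left]
      simp only [hslice]
      -- the inner loop = filter by disjointness, mapped
      have hrow := pvEnumFoldFilter
        (fun j => !(PySem.Set.contains (pvConflicts (pvPostings (pre ++ e :: t)) e.1) j))
        (fun y : List String × Int => pvCondA e.1 y.1)
        (fun y : List String × Int => [(e.1, e.2), (y.1, y.2)])
        t ((pre.length : Int) + 1) acc_ ?hcond
      case hcond =>
        intro k hk
        obtain ⟨hlen, hget⟩ := pvGetAppend pre t e k hk
        have hcontains : PySem.Set.contains (pvConflicts (pvPostings (pre ++ e :: t)) e.1)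
            ((pre.length : Int) + 1 + (k : Int)) = true ↔ ∃ v ∈ e.1, v ∈ t[k].1 := by
          rw [PySem.Set.contains_iff, pvConflicts_char]
          constructor
          · rintro ⟨k', hk', hjk, v, hv, hvk⟩
            have hkk : k' = pre.length + 1 + k := by omega
            subst hkk
            rw [hget] at hvk
            exact ⟨v, hv, hvk⟩
          · rintro ⟨v, hv, hvk⟩
            exact ⟨pre.length + 1 + k, hlen, by push_cast; ring, v, hv, by rw [hget]; exact hvk⟩
        rw [Bool.eq_iff_iff]
        rw [Bool.not_eq_true']
        rw [← Bool.not_eq_true (PySem.Set.contains (pvConflicts (pvPostings (pre ++ e :: t)) e.1)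
          ((pre.length : Int) + 1 + (k : Int))), hcontains, pvCondA_iff]
        push Not
        tauto
      rw [hrow]
      have h3 : (pre.length : Int) + 1 = (((pre ++ [e]).length : Nat) : Int) := by simp
      rw [h3, ih (pre ++ [e]) (acc_ ++ (t.filter fun y => pvCondA e.1 y.1).map
        (fun y => [(e.1, e.2), (y.1, y.2)])) (by simp)]
      simp [pvTailPairs]

theorem pvMain (path_history : List (List String × Int)) :
    find_mutualy_exclusive_paths path_history = find_mutualy_exclusive_paths_alt path_history := by
  rw [pvA_char]
  unfold find_mutualy_exclusive_paths_alt
  exact (pvB_gen path_history path_history [] [] rfl).symm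

-- ===== VERDICT (by name: the statement is the Claim_ definition above) =====
theorem find_mutualy_exclusive_paths_spec : Claim_equal_find_mutualy_exclusive_paths := by
  intro ph _
  unfold Spec_find_mutualy_exclusive_paths
  exact pvMain ph
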